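-- pv_equiv track=rewrite | github.com/Ilya-Stetskiy/OpenFold3_project | openfold3_length_benchmark/benchmarking.py | _tokenize_cif_row
-- ===== SOURCE A (Python) =====
-- def _tokenize_cif_row(line: str) -> list[str]:
--     tokens: list[str] = []
--     current = []
--     quote: str | None = None
--     for char in line.strip():
--         if quote is not None:
--             if char == quote:
--                 tokens.append("".join(current))
--                 current = []
--                 quote = None
--             else:
--                 current.append(char)
--             continue
--         if char in {"'", '"'}:
--             if current:
--                 tokens.append("".join(current))
--                 current = []
--             quote = char
--             continue
--         if char.isspace():
--             if current:
--                 tokens.append("".join(current))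
--                 current = []
--             continue
--         current.append(char)
--     if current:
--         tokens.append("".join(current))
--     return tokens
-- ===== SOURCE B (Python) =====
-- def _tokenize_cif_row(line: str) -> list[str]:
--     s = line.strip()
--     tokens: list[str] = []
--     i, n = 0, len(s)
--     while i < n:
--         c = s[i]
--         if c == "'" or c == '"':
--             j = s.find(c, i + 1)
--             if j != -1:
--                 tokens.append(s[i + 1:j])
--                 i = j + 1
--             else:
--                 if i + 1 < n:
--                     tokens.append(s[i + 1:])
--                 i = n
--         elif c.isspace():
--             i += 1
--         else:
--             j = i
--             while j < n and not (s[j].isspace() or s[j] == "'" or s[j] == '"'):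
--                 j += 1
--             tokens.append(s[i:j])
--             i = j
--     return tokens
-- ===== Notes on version B (the rewrite author's own statement) =====
-- stated objective: alternative
-- what changed: Replaces A's per-character state machine (quote flag + character accumulator) with an index-jumping scanner that locates each whole token at once: str.find for the closing quote, a run scan for unquoted fields.
import Mathlib
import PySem

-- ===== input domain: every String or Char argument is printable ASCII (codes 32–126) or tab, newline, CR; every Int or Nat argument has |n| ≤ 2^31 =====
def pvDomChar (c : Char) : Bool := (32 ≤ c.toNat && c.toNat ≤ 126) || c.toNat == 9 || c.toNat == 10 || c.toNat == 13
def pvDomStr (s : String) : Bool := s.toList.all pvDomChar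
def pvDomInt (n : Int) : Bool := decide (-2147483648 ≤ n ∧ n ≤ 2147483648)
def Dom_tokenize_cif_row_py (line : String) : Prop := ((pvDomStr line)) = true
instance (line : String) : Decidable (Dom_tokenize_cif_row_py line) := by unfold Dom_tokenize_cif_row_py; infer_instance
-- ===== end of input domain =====

-- B replaces A's per-character quote/accumulator state machine with an index-free scanner that
-- jumps over whole tokens using find (closing quote) and span (unquoted run); objective: alternative.


-- ===== PORT A =====
-- the Python for-loop over line.strip(), state (tokens, current, quote), transliterated
def aLoop : List Char → List String × List Char × Option Char → List String × List Char × Option Char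
  | [], st => st
  | ch :: rest, (tokens, current, quote) =>
    match quote with
    | some q =>
      if ch = q then aLoop rest (tokens ++ [String.mk current], [], none)
      else aLoop rest (tokens, current ++ [ch], some q)
    | none =>
      if ch = '\'' ∨ ch = '"' then
        if current ≠ [] then aLoop rest (tokens ++ [String.mk current], [], some ch)
        else aLoop rest (tokens, [], some ch)
      else if PySem.Chars.isspace ch then
        if current ≠ [] then aLoop rest (tokens ++ [String.mk current], [], none)
        else aLoop rest (tokens, [], none)
      else aLoop rest (tokens, current ++ [ch], none)

def tokenize_cif_row_py (line : String) : List String :=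
  match aLoop (PySem.Str.strip line).toList ([], [], none) with
  | (tokens, current, _) => if current ≠ [] then tokens ++ [String.mk current] else tokens

-- ===== PORT B =====
-- s.find(c, i+1) on the suffix after the opening quote: first occurrence split, ported by hand (exact)
def bFind (q : Char) : List Char → Option (List Char × List Char)
  | [] => none
  | c :: rest =>
    if c = q then some ([], rest)
    else
      match bFind q rest with
      | some (a, b) => some (c :: a, b)
      | none => none

-- unquoted-run characters (the inner while condition, negated)
def bRun (c : Char) : Bool := ¬ (PySem.Chars.isspace c ∨ c = '\'' ∨ c = '"')

theorem bFind_length_lt {q : Char} : ∀ {l a b : List Char}, bFind q l = some (a, b) → b.length < l.length := by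
  intro l
  induction l with
  | nil => intro a b h; simp [bFind] at h
  | cons c rest ih =>
    intro a b h
    by_cases hc : c = q
    · simp [bFind, hc] at h
      simp [← h.2]
    · simp only [bFind, if_neg hc] at h
      cases hf : bFind q rest with
      | none => rw [hf] at h; simp at h
      | some p =>
        obtain ⟨a', b'⟩ := p
        rw [hf] at h
        simp at h
        have := ih (a := a') (b := b') hf
        rw [← h.2]
        simp; omega

def bGo : List Char → List String
  | [] => []
  | c :: rest =>
    if c = '\'' ∨ c = '"' then
      match h : bFind c rest with
      | some (a, b) => String.mk a :: bGo b
      | none => if rest.isEmpty then [] else [String.mk rest]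
    else if PySem.Chars.isspace c then bGo rest
    else String.mk (c :: rest.takeWhile bRun) :: bGo (rest.dropWhile bRun)
termination_by l => l.length
decreasing_by
  · exact Nat.lt_succ_of_lt (bFind_length_lt h)
  · simp
  · exact Nat.lt_succ_of_le (List.length_dropWhile_le _ _)

def tokenize_cif_row_py_alt (line : String) : List String :=
  bGo (PySem.Str.strip line).toList

-- ===== PRECONDITION & SPEC =====
def Spec_tokenize_cif_row_py (line : String) (out : List String) : Prop := out = tokenize_cif_row_py_alt line
instance (line : String) (out : List String) : Decidable (Spec_tokenize_cif_row_py line out) := by unfold Spec_tokenize_cif_row_py; infer_instance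

-- ===== CLAIM (what is proved, stated in full; the proofs are below) =====
def Claim_equal_tokenize_cif_row_py : Prop := ∀ (line : String), Dom_tokenize_cif_row_py line → Spec_tokenize_cif_row_py line (tokenize_cif_row_py line)

-- ===== LEMMAS AND PROOFS =====

def finishA (st : List String × List Char × Option Char) : List String :=
  match st with
  | (tokens, current, _) => if current ≠ [] then tokens ++ [String.mk current] else tokens

-- in-quote phase of A = split at the closing quote
theorem aLoop_quote (q : Char) : ∀ (l : List Char) (tokens : List String) (cur : List Char),
    aLoop l (tokens, cur, some q) =
      match bFind q l with
      | some (a, b) => aLoop b (tokens ++ [String.mk (cur ++ a)], [], none)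
      | none => (tokens, cur ++ l, some q) := by
  intro l
  induction l with
  | nil => intro tokens cur; simp [aLoop, bFind]
  | cons c rest ih =>
    intro tokens cur
    by_cases hc : c = q
    · simp [aLoop, bFind, hc]
    · simp only [aLoop, if_neg hc, bFind, ih]
      cases hf : bFind q rest with
      | none => simp
      | some p => simp

-- run phase of A: accumulating characters while bRun holds
theorem aLoop_run : ∀ (l : List Char) (tokens : List String) (cur : List Char),
    aLoop l (tokens, cur, none) = aLoop (l.dropWhile bRun) (tokens, cur ++ l.takeWhile bRun, none) := by
  intro l
  induction l with
  | nil => intros; simp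
  | cons c rest ih =>
    intro tokens cur
    by_cases hr : bRun c = true
    · simp [bRun] at hr
      have hq : ¬ (c = '\'' ∨ c = '"') := by tauto
      have hs : ¬ PySem.Chars.isspace c = true := by simp [hr.1]
      have hr : bRun c = true := by simp [bRun, hr.1, hr.2.1, hr.2.2]
      simp only [aLoop, if_neg hq, if_neg hs, List.dropWhile_cons, List.takeWhile_cons, hr,
        if_pos trivial, ih]
      simp
    · simp only [List.dropWhile_cons, List.takeWhile_cons, hr]
      simp

-- a delimiter flushes a nonempty pending run
theorem aLoop_flush (d : Char) (l2 : List Char) (tokens : List String) (cur : List Char)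
    (hd : ¬ bRun d = true) (hc : cur ≠ []) :
    aLoop (d :: l2) (tokens, cur, none) = aLoop (d :: l2) (tokens ++ [String.mk cur], [], none) := by
  by_cases hq : d = '\'' ∨ d = '"'
  · simp [aLoop, hq, hc]
  · have hs : PySem.Chars.isspace d = true := by
      simp [bRun] at hd
      have hq' := not_or.mp hq
      cases h : PySem.Chars.isspace d with
      | false => exact absurd (hd h hq'.1) hq'.2
      | true => rfl
    simp [aLoop, hq, hs, hc]

theorem dropWhile_head_false {p : Char → Bool} : ∀ {l : List Char} {d : Char} {l2 : List Char},
    l.dropWhile p = d :: l2 → p d = false := by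
  intro l
  induction l with
  | nil => intro d l2 h; simp at h
  | cons c rest ih =>
    intro d l2 h
    by_cases hp : p c = true
    · rw [List.dropWhile_cons_of_pos hp] at h; exact ih h
    · rw [List.dropWhile_cons_of_neg hp] at h
      injection h with h1 _
      subst h1
      revert hp; cases p c <;> simp

theorem main_lemma : ∀ (n : Nat) (l : List Char), l.length ≤ n → ∀ (tokens : List String),
    finishA (aLoop l (tokens, [], none)) = tokens ++ bGo l := by
  intro n
  induction n with
  | zero =>
    intro l hl tokens
    have : l = [] := List.eq_nil_of_length_eq_zero (Nat.le_zero.mp hl)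
    subst this
    simp [aLoop, finishA, bGo]
  | succ m ih =>
    intro l hl tokens
    cases l with
    | nil => simp [aLoop, finishA, bGo]
    | cons c rest =>
      have hrest : rest.length ≤ m := by simp at hl; omega
      by_cases hq : c = '\'' ∨ c = '"'
      · -- quote opener
        have hA : aLoop (c :: rest) (tokens, [], none) = aLoop rest (tokens, [], some c) := by
          simp [aLoop, hq]
        rw [hA, aLoop_quote]
        cases hf : bFind c rest with
        | some p =>
          obtain ⟨a, b⟩ := p
          have hb : b.length ≤ m := by
            have := bFind_length_lt (q := c) hf; omega
          rw [ih b hb]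
          simp only [bGo, if_pos hq]
          rw [hf]
          simp
        | none =>
          simp only [bGo, if_pos hq]
          rw [hf]
          cases rest with
          | nil => simp [finishA]
          | cons r rs => simp [finishA]
      · by_cases hs : PySem.Chars.isspace c = true
        · have hA : aLoop (c :: rest) (tokens, [], none) = aLoop rest (tokens, [], none) := by
            simp [aLoop, hq, hs]
          rw [hA, ih rest hrest]
          simp only [bGo, if_neg hq, if_pos hs]
        · -- run character
          have hs' : PySem.Chars.isspace c = false := by
            revert hs; cases PySem.Chars.isspace c <;> simp
          have hq' := not_or.mp hq
          have hr : bRun c = true := by simp [bRun, hs', hq'.1, hq'.2]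
          have hA : aLoop (c :: rest) (tokens, [], none) = aLoop rest (tokens, [c], none) := by
            simp [aLoop, hq, hs]
          rw [hA, aLoop_run]
          have hcur : (c :: rest.takeWhile bRun) ≠ [] := by simp
          cases hdw : rest.dropWhile bRun with
          | nil =>
            have htw : rest.takeWhile bRun = rest := by
              have := List.takeWhile_append_dropWhile (p := bRun) (l := rest)
              rw [hdw] at this; simpa using this
            simp only [aLoop, finishA, htw]
            simp only [bGo, if_neg hq, if_neg hs, hdw, htw]
            simp
          | cons d l2 =>
            have hd : ¬ bRun d = true := by
              simp [dropWhile_head_false hdw]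
            rw [aLoop_flush d l2 tokens _ hd (by simp)]
            have hl2 : (d :: l2).length ≤ m := by
              have := List.length_dropWhile_le (p := bRun) (l := rest)
              rw [hdw] at this; simp at this ⊢; omega
            rw [ih (d :: l2) hl2]
            simp only [bGo, if_neg hq, if_neg hs, hdw]
            simp

-- ===== VERDICT (by name: the statement is the Claim_ definition above) =====
theorem tokenize_cif_row_py_spec : Claim_equal_tokenize_cif_row_py := by
  intro line _
  have := main_lemma (PySem.Str.strip line).toList.length (PySem.Str.strip line).toList le_rfl []
  simpa [Spec_tokenize_cif_row_py, tokenize_cif_row_py, tokenize_cif_row_py_alt, finishA] using this
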